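-- pv_equiv track=rewrite | github.com/SharonDiskin/dataBasesEx02 | DatastracturesEx02.py | isTheRightConditionFor11b
-- ===== SOURCE A (Python) =====
-- def swapAndWithComma(sigma) -> str:
--     sigma = sigma.replace("AND", ",")
--     return sigma
--
-- def makeConditionsFromSigmas(Sigmas) -> list:
--     conditions = []
--     for sigma in Sigmas:
--         sigma = swapAndWithComma(sigma)
--         conditions += str(sigma).split(",")
--
--     stripedConditions = []
--     for condition in conditions:
--         stripedConditions.append(condition.replace(" ", ""))
--
--     return stripedConditions
--
-- def isTheRightConditionFor11b(conditionsList) -> bool: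
--     conditions = makeConditionsFromSigmas(conditionsList)
--     foundCondition1 = False
--     foundCondition2 = False
--     if len(conditions) == 2:  # We need to have exactly two conditions in this sigma
--         for condition in conditions:
--             if condition == "R.D=S.D" or condition == "S.D=R.D":
--                 foundCondition1 = True
--             elif condition == "R.E=S.E" or condition == "S.E=R.E":
--                 foundCondition2 = True
--             if foundCondition1 and foundCondition2:
--                 return True
--         return False
--     return False
-- ===== SOURCE B (Python) =====
-- _LABEL = {"R.D=S.D": "D", "S.D=R.D": "D", "R.E=S.E": "E", "S.E=R.E": "E"}
--
-- def isTheRightConditionFor11b(conditionsList) -> bool: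
--     conditions = [c.replace(" ", "")
--                   for s in conditionsList
--                   for c in s.replace("AND", ",").split(",")]
--     return sorted(_LABEL.get(c, "?") for c in conditions) == ["D", "E"]
-- ===== Notes on version B (the rewrite author's own statement) =====
-- stated objective: alternative
-- what changed: A's two staged accumulation loops and the two-flag elif loop with an explicit length-2 guard and early return are replaced by classifying each normalized condition through a constant dict into a one-letter label and comparing the sorted label list against the expected two labels, which checks arity and one-of-each-pair in a single list equality.
import Mathlib
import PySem

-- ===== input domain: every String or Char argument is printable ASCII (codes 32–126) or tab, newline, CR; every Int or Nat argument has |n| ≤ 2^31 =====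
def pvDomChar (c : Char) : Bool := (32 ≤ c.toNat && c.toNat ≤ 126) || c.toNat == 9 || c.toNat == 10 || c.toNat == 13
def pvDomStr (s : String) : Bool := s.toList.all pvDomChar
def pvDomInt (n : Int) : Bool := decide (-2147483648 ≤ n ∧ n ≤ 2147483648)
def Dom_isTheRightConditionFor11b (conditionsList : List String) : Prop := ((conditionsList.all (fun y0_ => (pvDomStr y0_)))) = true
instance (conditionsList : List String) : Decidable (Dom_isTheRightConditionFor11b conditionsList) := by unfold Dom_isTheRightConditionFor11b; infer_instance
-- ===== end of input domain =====

-- B replaces A's two staged accumulation loops, length guard and two-flag elif loop by one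
-- comprehension plus a dict classification of each condition into a label ('D'/'E'/'?') whose
-- sorted list is compared with ["D","E"] (objective: alternative, same cost).

-- ===== PORT A =====
def swapAndWithComma (sigma : String) : String :=
  PySem.Str.replace sigma "AND" ","

def makeConditionsFromSigmas (Sigmas : List String) : List String :=
  let conditions :=
    Sigmas.foldl (fun acc sigma => acc ++ (PySem.Str.split? (swapAndWithComma sigma) ",").getD []) []
  conditions.foldl (fun acc condition => acc ++ [PySem.Str.replace condition " " ""]) []

-- the 'for condition in conditions' loop of A, with its two flags and early return
def pvLoopA : List String → Bool → Bool → Bool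
  | [], _, _ => false
  | condition :: rest, f1, f2 =>
    let f1 := if condition = "R.D=S.D" ∨ condition = "S.D=R.D" then true else f1
    let f2 := if ¬ (condition = "R.D=S.D" ∨ condition = "S.D=R.D") ∧
                 (condition = "R.E=S.E" ∨ condition = "S.E=R.E") then true else f2
    if f1 && f2 then true else pvLoopA rest f1 f2

def isTheRightConditionFor11b (conditionsList : List String) : Bool :=
  let conditions := makeConditionsFromSigmas conditionsList
  if conditions.length = 2 then pvLoopA conditions false false
  else false

-- ===== PORT B =====
-- the constant _LABEL dict of Source B
def pvLabelDict : PySem.Dict String String :=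
  ((((PySem.Dict.empty).insert "R.D=S.D" "D").insert "S.D=R.D" "D").insert "R.E=S.E" "E").insert "S.E=R.E" "E"

def isTheRightConditionFor11b_alt (conditionsList : List String) : Bool :=
  let conditions :=
    (conditionsList.flatMap
        (fun s => (PySem.Str.split? (PySem.Str.replace s "AND" ",") ",").getD [])).map
      (fun c => PySem.Str.replace c " " "")
  decide (PySem.List.sorted (conditions.map (fun c => PySem.Dict.getD pvLabelDict c "?"))
      (fun x => x) false = ["D", "E"])

-- ===== PRECONDITION & SPEC =====
def Spec_isTheRightConditionFor11b (conditionsList : List String) (out : Bool) : Prop := out = isTheRightConditionFor11b_alt conditionsList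
instance (conditionsList : List String) (out : Bool) : Decidable (Spec_isTheRightConditionFor11b conditionsList out) := by unfold Spec_isTheRightConditionFor11b; infer_instance

-- ===== CLAIM (what is proved, stated in full; the proofs are below) =====
def Claim_equal_isTheRightConditionFor11b : Prop := ∀ (conditionsList : List String), Dom_isTheRightConditionFor11b conditionsList → Spec_isTheRightConditionFor11b conditionsList (isTheRightConditionFor11b conditionsList)

-- ===== LEMMAS AND PROOFS =====

-- A's two accumulation loops build exactly B's flatMap+map list
lemma conditions_eq (xs : List String) :
    makeConditionsFromSigmas xs =
      (xs.flatMap (fun s => (PySem.Str.split? (PySem.Str.replace s "AND" ",") ",").getD [])).map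
        (fun c => PySem.Str.replace c " " "") := by
  unfold makeConditionsFromSigmas swapAndWithComma
  rw [PySem.List.foldl_append_eq_flatMap, PySem.List.foldl_append_eq_flatMap,
    ← List.map_eq_flatMap]
  simp

-- B's dict lookup classifies a condition into its label
lemma label_spec (c : String) :
    PySem.Dict.getD pvLabelDict c "?" =
      (if c = "R.D=S.D" ∨ c = "S.D=R.D" then "D"
       else if c = "R.E=S.E" ∨ c = "S.E=R.E" then "E" else "?") := by
  by_cases h1 : c = "R.D=S.D"
  · subst h1; decide
  by_cases h2 : c = "S.D=R.D"
  · subst h2; decide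
  by_cases h3 : c = "R.E=S.E"
  · subst h3; decide
  by_cases h4 : c = "S.E=R.E"
  · subst h4; decide
  have e1 : ("R.D=S.D" == c) = false := by simp [Ne.symm h1]
  have e2 : ("S.D=R.D" == c) = false := by simp [Ne.symm h2]
  have e3 : ("R.E=S.E" == c) = false := by simp [Ne.symm h3]
  have e4 : ("S.E=R.E" == c) = false := by simp [Ne.symm h4]
  simp [pvLabelDict, PySem.Dict.getD, PySem.Dict.get?, PySem.Dict.insert, PySem.Dict.empty,
    List.find?, e1, e2, e3, e4, h1, h2, h3, h4]

-- on a two-element list A's flag loop agrees with B's sorted-labels comparison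
lemma loop_two (a b : String) :
    pvLoopA [a, b] false false =
      decide (PySem.List.sorted
          [PySem.Dict.getD pvLabelDict a "?", PySem.Dict.getD pvLabelDict b "?"]
          (fun x => x) false = ["D", "E"]) := by
  rw [label_spec a, label_spec b]
  by_cases h1 : a = "R.D=S.D" <;> by_cases h2 : a = "S.D=R.D" <;>
    by_cases h3 : a = "R.E=S.E" <;> by_cases h4 : a = "S.E=R.E" <;>
    by_cases h5 : b = "R.D=S.D" <;> by_cases h6 : b = "S.D=R.D" <;>
    by_cases h7 : b = "R.E=S.E" <;> by_cases h8 : b = "S.E=R.E" <;>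
    simp_all [pvLoopA, PySem.List.sorted, PySem.List.insertBy] <;> decide

-- ===== VERDICT (by name: the statement is the Claim_ definition above) =====
theorem isTheRightConditionFor11b_spec : Claim_equal_isTheRightConditionFor11b := by
  intro xs _
  unfold Spec_isTheRightConditionFor11b isTheRightConditionFor11b isTheRightConditionFor11b_alt
  rw [← conditions_eq]
  cases h : makeConditionsFromSigmas xs with
  | nil => simp [PySem.List.sorted]
  | cons a t =>
    cases t with
    | nil => simp [PySem.List.sorted, PySem.List.insertBy]
    | cons b t2 =>
      cases t2 with
      | nil => simpa using loop_two a b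
      | cons c t3 =>
        have hne : (PySem.List.sorted
            (PySem.Dict.getD pvLabelDict a "?" :: PySem.Dict.getD pvLabelDict b "?" ::
              PySem.Dict.getD pvLabelDict c "?" ::
                List.map (fun c => PySem.Dict.getD pvLabelDict c "?") t3)
            (fun x => x) false) ≠ ["D", "E"] := by
          intro hEq
          have hl := congrArg List.length hEq
          rw [PySem.List.length_sorted] at hl
          simp at hl
        simp [hne]
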